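-- pv_equiv track=rewrite | github.com/Oirien/Homework_01 | advanced_logic_exercise.py | sum_skipping
-- ===== SOURCE A (Python) =====
-- def sum_skipping(list_of_numbers):
--     sum_total = iter(list_of_numbers)
--     total = 0
--     for num in sum_total:
--         if num == 6:
--             7 in sum_total
--         else:
--             total += num
--     return total
-- ===== SOURCE B (Python) =====
-- def sum_skipping(list_of_numbers):
--     total = 0
--     skipping = False
--     for num in list_of_numbers:
--         if skipping:
--             if num == 7:
--                 skipping = False
--             continue
--         if num == 6:
--             skipping = True
--         else:
--             total += num
--     return total
-- ===== Notes on version B (the rewrite author's own statement) =====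
-- stated objective: idiomatic
-- what changed: Replaces the shared-iterator trick ('7 in sum_total' consuming the loop's iterator) with a single plain for-loop over the list maintaining an explicit boolean skipping flag.
import Mathlib
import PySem

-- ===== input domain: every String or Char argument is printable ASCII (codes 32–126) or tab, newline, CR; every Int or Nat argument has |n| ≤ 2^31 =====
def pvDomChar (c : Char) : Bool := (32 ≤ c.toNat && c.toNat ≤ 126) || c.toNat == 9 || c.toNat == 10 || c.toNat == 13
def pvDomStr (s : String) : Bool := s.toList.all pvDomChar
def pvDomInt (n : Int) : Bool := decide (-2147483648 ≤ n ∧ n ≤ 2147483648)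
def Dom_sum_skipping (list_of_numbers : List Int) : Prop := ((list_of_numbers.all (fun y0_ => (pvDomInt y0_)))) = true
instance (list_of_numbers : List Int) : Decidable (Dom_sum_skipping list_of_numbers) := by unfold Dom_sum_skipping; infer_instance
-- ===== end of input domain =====

-- B: same sum with an explicit boolean skipping flag instead of A's shared-iterator consumption; idiomatic rewrite, same cost.
-- ===== PORT A =====
-- `7 in sum_total`: consume the iterator until a 7 is found (the 7 is consumed too)
def pyIn7 : List Int → List Int
  | [] => []
  | x :: xs => if x == 7 then xs else pyIn7 xs

theorem pyIn7_len_le : ∀ (l : List Int), (pyIn7 l).length ≤ l.length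
  | [] => Nat.le_refl _
  | x :: xs => by
      simp only [pyIn7]
      split
      · exact Nat.le_succ _
      · exact Nat.le_trans (pyIn7_len_le xs) (Nat.le_succ _)

def sumSkipGo : List Int → Int → Int
  | [], total => total
  | num :: rest, total =>
      if num == 6 then sumSkipGo (pyIn7 rest) total
      else sumSkipGo rest (total + num)
termination_by l => l.length
decreasing_by
  · exact Nat.lt_succ_of_le (pyIn7_len_le rest)
  · exact Nat.lt_succ_self _

def sum_skipping (list_of_numbers : List Int) : Int :=
  sumSkipGo list_of_numbers 0

-- ===== PORT B =====
def altStep (s : Int × Bool) (num : Int) : Int × Bool :=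
  if s.2 then (s.1, if num == 7 then false else true)
  else if num == 6 then (s.1, true)
  else (s.1 + num, false)

def sum_skipping_alt (list_of_numbers : List Int) : Int :=
  (list_of_numbers.foldl altStep (0, false)).1

-- ===== PRECONDITION & SPEC =====
def Spec_sum_skipping (list_of_numbers : List Int) (out : Int) : Prop := out = sum_skipping_alt list_of_numbers
instance (list_of_numbers : List Int) (out : Int) : Decidable (Spec_sum_skipping list_of_numbers out) := by unfold Spec_sum_skipping; infer_instance

-- ===== CLAIM (what is proved, stated in full; the proofs are below) =====
def Claim_equal_sum_skipping : Prop := ∀ (list_of_numbers : List Int), Dom_sum_skipping list_of_numbers → Spec_sum_skipping list_of_numbers (sum_skipping list_of_numbers)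

-- ===== LEMMAS AND PROOFS =====

theorem foldl_skip (l : List Int) (acc : Int) :
    (l.foldl altStep (acc, true)).1 = ((pyIn7 l).foldl altStep (acc, false)).1 := by
  induction l with
  | nil => simp [pyIn7]
  | cons x xs ih =>
      by_cases h : x == 7 <;> simp [pyIn7, altStep, h, ih]

theorem go_eq_foldl (l : List Int) (total : Int) :
    sumSkipGo l total = (l.foldl altStep (total, false)).1 := by
  fun_induction sumSkipGo l total with
  | case1 total => simp
  | case2 num rest total h ih =>
      simp only [List.foldl_cons, altStep, h, if_true, if_false,
        Bool.false_eq_true]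
      rw [ih, ← foldl_skip]
  | case3 num rest total h ih =>
      simp [List.foldl_cons, altStep, h, ih]

-- ===== VERDICT (by name: the statement is the Claim_ definition above) =====
theorem sum_skipping_spec : Claim_equal_sum_skipping := by
  intro l _
  unfold Spec_sum_skipping sum_skipping sum_skipping_alt
  exact go_eq_foldl l 0
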